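-- pv_equiv track=rewrite | github.com/mbd888/alancoin | experiments/harness/market/counterbalancing.py | generate_model_rotation
-- ===== SOURCE A (Python) =====
-- def generate_model_rotation(
--     models: list[str],
--     num_runs: int,
-- ) -> list[str]:
--     """
--     Generate a model rotation for sequential runs.
--
--     Ensures equal distribution of models across runs.
--
--     Args:
--         models: List of model names
--         num_runs: Total number of runs
--
--     Returns:
--         List of model names, one per run
--     """
--     rotation = []
--     for i in range(num_runs):
--         rotation.append(models[i % len(models)])
--     return rotation
-- ===== SOURCE B (Python) =====
-- def generate_model_rotation(
--     models: list[str],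
--     num_runs: int,
-- ) -> list[str]:
--     if num_runs <= 0:
--         return []
--     return (models * (num_runs // len(models) + 1))[:num_runs]
-- ===== Notes on version B (the rewrite author's own statement) =====
-- stated objective: idiomatic
-- what changed: Replaces the per-index modulo loop with whole-list tiling (list repetition) followed by a slice to length, guarded by an early return for non-positive num_runs.
import Mathlib
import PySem

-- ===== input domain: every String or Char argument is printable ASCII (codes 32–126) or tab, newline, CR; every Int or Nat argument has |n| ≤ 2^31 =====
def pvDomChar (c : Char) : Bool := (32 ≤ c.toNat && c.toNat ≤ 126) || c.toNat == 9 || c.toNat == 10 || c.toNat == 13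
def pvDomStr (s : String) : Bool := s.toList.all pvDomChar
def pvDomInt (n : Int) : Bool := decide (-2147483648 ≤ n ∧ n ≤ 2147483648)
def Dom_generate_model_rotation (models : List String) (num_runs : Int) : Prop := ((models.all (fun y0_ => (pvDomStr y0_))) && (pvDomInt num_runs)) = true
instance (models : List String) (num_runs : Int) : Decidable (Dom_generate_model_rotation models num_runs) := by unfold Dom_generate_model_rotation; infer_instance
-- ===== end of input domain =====

-- B replaces A's per-index modulo loop by tiling the models list and slicing to length (idiomatic decomposition).


-- ===== PORT A =====
-- for i in range(num_runs): rotation.append(models[i % len(models)])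
def generate_model_rotation (models : List String) (num_runs : Int) : List String :=
  (PySem.List.pyRange 0 num_runs 1).foldl
    (fun rotation i =>
      rotation ++ [PySem.List.pyGetD models (PySem.Int.mod i (models.length : Int)) ""]) []

-- ===== PORT B =====
-- if num_runs <= 0: return [];  return (models * (num_runs // len(models) + 1))[:num_runs]
def generate_model_rotation_alt (models : List String) (num_runs : Int) : List String :=
  if num_runs ≤ 0 then []
  else
    PySem.List.slice
      ((List.replicate (PySem.Int.floordiv num_runs (models.length : Int) + 1).toNat models).flatten)
      none (some num_runs)

-- ===== PRECONDITION & SPEC =====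
-- Pre_ excludes exactly the inputs where A raises ZeroDivisionError (empty models with positive num_runs); B raises there too.
def Pre_generate_model_rotation (models : List String) (num_runs : Int) : Prop :=
  num_runs ≤ 0 ∨ models ≠ []
instance (models : List String) (num_runs : Int) : Decidable (Pre_generate_model_rotation models num_runs) := by unfold Pre_generate_model_rotation; infer_instance
def pvWitness_generate_model_rotation : List String × Int := (["gpt", "claude"], 5)

def Spec_generate_model_rotation (models : List String) (num_runs : Int) (out : List String) : Prop := out = generate_model_rotation_alt models num_runs
instance (models : List String) (num_runs : Int) (out : List String) : Decidable (Spec_generate_model_rotation models num_runs out) := by unfold Spec_generate_model_rotation; infer_instance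

-- ===== CLAIM (what is proved, stated in full; the proofs are below) =====
def Claim_equal_generate_model_rotation : Prop := ∀ (models : List String) (num_runs : Int), Dom_generate_model_rotation models num_runs → Pre_generate_model_rotation models num_runs → Spec_generate_model_rotation models num_runs (generate_model_rotation models num_runs)

-- ===== LEMMAS AND PROOFS =====

-- A's append-accumulator fold is a map over the range.
theorem pv_foldl_append_map {α β : Type} (f : α → β) (l : List α) (acc : List β) :
    l.foldl (fun r i => r ++ [f i]) acc = acc ++ l.map f := by
  induction l generalizing acc with
  | nil => simp
  | cons x xs ih => simp [List.foldl, ih]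

-- indexing into a tiled list is modulo indexing
theorem pv_flatten_replicate_getElem? {α : Type} (xs : List α) (hn : 0 < xs.length) :
    ∀ m k, k < m * xs.length →
      (List.replicate m xs).flatten[k]? = xs[k % xs.length]? := by
  intro m
  induction m with
  | zero => intro k hk; omega
  | succ m ih =>
    intro k hk
    rw [List.replicate_succ, List.flatten_cons]
    by_cases hlt : k < xs.length
    · rw [List.getElem?_append_left hlt, Nat.mod_eq_of_lt hlt]
    · push_neg at hlt
      rw [List.getElem?_append_right hlt,
          ih (k - xs.length) (by rw [Nat.succ_mul] at hk; omega)]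
      congr 1
      conv_rhs => rw [← Nat.sub_add_cancel hlt]
      rw [Nat.add_mod_right]

theorem generate_model_rotation_eq_map (models : List String) (num_runs : Int)
    (hm : models ≠ []) :
    generate_model_rotation models num_runs
      = (List.range num_runs.toNat).map
          (fun k => models[k % models.length]'(Nat.mod_lt _ (List.length_pos_of_ne_nil hm))) := by
  have hn : 0 < models.length := List.length_pos_of_ne_nil hm
  unfold generate_model_rotation
  rw [pv_foldl_append_map, PySem.List.pyRange_one, List.map_map]
  simp only [Int.sub_zero, List.nil_append]
  apply List.map_congr_left
  intro k hk
  simp only [Function.comp_apply]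
  have hmod : PySem.Int.mod (0 + (k : Int)) (models.length : Int)
      = ((k % models.length : Nat) : Int) := by
    rw [Int.zero_add]
    exact_mod_cast PySem.Int.mod_natCast k models.length
  rw [hmod, PySem.List.pyGetD_natCast]
  simp [Nat.mod_lt _ hn]

-- ===== VERDICT (by name: the statement is the Claim_ definition above) =====
theorem generate_model_rotation_spec : Claim_equal_generate_model_rotation := by
  intro models num_runs _ hpre
  unfold Spec_generate_model_rotation generate_model_rotation_alt
  by_cases hle : num_runs ≤ 0
  · simp [hle, generate_model_rotation, PySem.List.pyRange_one_eq_nil hle]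
  · have hm : models ≠ [] := by
      rcases hpre with h | h
      · exact absurd h hle
      · exact h
    have hn : 0 < models.length := List.length_pos_of_ne_nil hm
    have hpos : 0 < num_runs := by omega
    simp only [hle, if_false]
    rw [PySem.List.slice_to _ (le_of_lt hpos)]
    rw [generate_model_rotation_eq_map models num_runs hm]
    have hq : PySem.Int.floordiv num_runs (models.length : Int)
        = num_runs / (models.length : Int) :=
      PySem.Int.floordiv_eq_ediv_of_pos (by exact_mod_cast hn)
    have hq0 : 0 ≤ num_runs / (models.length : Int) :=
      Int.ediv_nonneg (le_of_lt hpos) (by positivity)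
    have hmc : (((PySem.Int.floordiv num_runs (models.length : Int) + 1).toNat : Int))
        = num_runs / (models.length : Int) + 1 := by rw [hq]; omega
    have hcov : num_runs.toNat
        ≤ (PySem.Int.floordiv num_runs (models.length : Int) + 1).toNat * models.length := by
      have h1 : num_runs < (num_runs / (models.length : Int) + 1) * (models.length : Int) :=
        Int.lt_ediv_add_one_mul_self num_runs (by exact_mod_cast hn)
      have h2 : ((num_runs.toNat : Int))
          < ((PySem.Int.floordiv num_runs (models.length : Int) + 1).toNat : Int)
              * (models.length : Int) := by
        rw [hmc, Int.toNat_of_nonneg (le_of_lt hpos)]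
        exact h1
      exact_mod_cast le_of_lt h2
    have hfl : ((List.replicate (PySem.Int.floordiv num_runs (models.length : Int) + 1).toNat
        models).flatten).length
        = (PySem.Int.floordiv num_runs (models.length : Int) + 1).toNat * models.length := by
      simp [List.length_flatten, Nat.mul_comm]
    apply List.ext_getElem
    · rw [List.length_take, hfl, List.length_map, List.length_range]
      omega
    · intro k h1 h2
      have hkN : k < num_runs.toNat := by simpa using h1
      rw [List.getElem_take, List.getElem_map, List.getElem_range]
      apply Option.some.inj
      rw [← List.getElem?_eq_getElem, ← List.getElem?_eq_getElem]
      exact (pv_flatten_replicate_getElem? models hn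
        ((PySem.Int.floordiv num_runs (models.length : Int) + 1).toNat) k (by omega)).symm
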